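-- pv_equiv track=rewrite | github.com/wcasper/pdf2graph | epstrim.py | remove_data_between
-- ===== SOURCE A (Python) =====
-- def remove_data_between(lines0,start,end):
--   lines = lines0.copy() # don't pulverize incoming data
--   nlines = len(lines)
--   lstart = len(start)
--   lend   = len(end)
--   li = 0
--   # begin loop over lines
--   while True:
--     if(li >= len(lines)):
--       break
--     line = lines[li]
--     if(len(line) >= lstart and line[:lstart] == start):
--       while True:
--         if(line[:lend] == end):
--           # delete the end line
--           lines.pop(li)
--           nlines -= 1
--           break
--         else:
--           # delete first or in-between line
--           lines.pop(li)
--           nlines -= 1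
--
--         # prevent a possible out of bounds array access, even though this
--         # shouldn't happen unless eps file format is nonstandard
--         if(li == nlines):
--           break
--
--         # reset the current line
--         line = lines[li]
--
--     else:
--       # move to the next line
--       # if we've covered all the lines, then exit the loop
--       li += 1
--       if(li >= nlines):
--         break
--   # end loop over lines
--   return lines
-- ===== SOURCE B (Python) =====
-- def remove_data_between(lines0, start, end):
--     out = []
--     skipping = False
--     for line in lines0:
--         if skipping:
--             if line.startswith(end):
--                 skipping = False
--         elif line.startswith(start):
--             if not line.startswith(end):
--                 skipping = True
--         else:
--             out.append(line)
--     return out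
-- ===== Notes on version B (the rewrite author's own statement) =====
-- stated objective: simpler
-- what changed: Replaces A's nested while-loops with repeated mid-list list.pop(li) deletions and manual index/length bookkeeping by a single forward pass that builds the result list with a skip-flag state machine.
import Mathlib
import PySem

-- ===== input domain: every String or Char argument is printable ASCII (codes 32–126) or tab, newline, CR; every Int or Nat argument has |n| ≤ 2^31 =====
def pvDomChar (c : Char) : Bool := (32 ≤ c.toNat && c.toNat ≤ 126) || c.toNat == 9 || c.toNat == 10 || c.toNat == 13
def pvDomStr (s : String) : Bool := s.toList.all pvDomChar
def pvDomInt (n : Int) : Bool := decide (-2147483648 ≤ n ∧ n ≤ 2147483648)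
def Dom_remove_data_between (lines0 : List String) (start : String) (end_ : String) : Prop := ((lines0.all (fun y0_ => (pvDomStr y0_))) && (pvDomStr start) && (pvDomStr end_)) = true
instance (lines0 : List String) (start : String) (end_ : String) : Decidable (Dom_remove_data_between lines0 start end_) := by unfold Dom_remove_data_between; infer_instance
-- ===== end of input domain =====

-- B replaces A's repeated mid-list list.pop deletions by one pass with a skip-flag; return value proved equal on all inputs.

-- ===== PORT A =====
-- A's inner 'while True' loop: pops lines[li] until an end-prefixed line is popped
-- or li == nlines; the fuel argument only guards termination (Python's loop always
-- stops first, so with enough fuel the 'none'/0 branches are unreachable).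
def pvAInner (end_ : String) (lend : Int) (li : Nat) :
    Nat → List String → Int → String → List String × Int
  | 0, lines, nlines, _ => (lines, nlines)
  | fuel+1, lines, nlines, line =>
    if PySem.Str.slice line none (some lend) = end_ then
      match PySem.List.pop? lines ((li : Nat) : Int) with
      | none => (lines, nlines)          -- unreachable: li is in range in Python
      | some r => (r.2, nlines - 1)
    else
      match PySem.List.pop? lines ((li : Nat) : Int) with
      | none => (lines, nlines)          -- unreachable
      | some r =>
        let lines' := r.2
        let nlines' := nlines - 1
        if ((li : Nat) : Int) = nlines' then (lines', nlines')
        else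
          match PySem.List.pyGet? lines' ((li : Nat) : Int) with
          | none => (lines', nlines')    -- unreachable
          | some line' => pvAInner end_ lend li fuel lines' nlines' line'

-- A's outer 'while True' loop over li
def pvAOuter (start end_ : String) (lstart lend : Int) :
    Nat → List String → Int → Nat → List String
  | 0, lines, _, _ => lines
  | fuel+1, lines, nlines, li =>
    if lines.length ≤ li then lines
    else
      match PySem.List.pyGet? lines ((li : Nat) : Int) with
      | none => lines                    -- unreachable
      | some line =>
        if lstart ≤ PySem.Str.len line ∧ PySem.Str.slice line none (some lstart) = start then
          let r := pvAInner end_ lend li (lines.length + 1) lines nlines line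
          pvAOuter start end_ lstart lend fuel r.1 r.2 li
        else
          let li' := li + 1
          if (nlines : Int) ≤ ((li' : Nat) : Int) then lines
          else pvAOuter start end_ lstart lend fuel lines nlines li'

def remove_data_between (lines0 : List String) (start : String) (end_ : String) : List String :=
  pvAOuter start end_ (PySem.Str.len start) (PySem.Str.len end_)
    (2 * lines0.length + 1) lines0 ((lines0.length : Nat) : Int) 0

-- ===== PORT B =====
-- one step of B's for-loop: state (out, skipping)
def pvBStep (start end_ : String) (st : List String × Bool) (line : String) : List String × Bool :=
  if st.2 then
    if PySem.Str.startswith line end_ then (st.1, false) else (st.1, true)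
  else if PySem.Str.startswith line start then
    if !PySem.Str.startswith line end_ then (st.1, true) else (st.1, false)
  else (st.1 ++ [line], st.2)

def remove_data_between_alt (lines0 : List String) (start : String) (end_ : String) : List String :=
  (lines0.foldl (pvBStep start end_) ([], false)).1

-- ===== PRECONDITION & SPEC =====
def Spec_remove_data_between (lines0 : List String) (start : String) (end_ : String) (out : List String) : Prop := out = remove_data_between_alt lines0 start end_
instance (lines0 : List String) (start : String) (end_ : String) (out : List String) : Decidable (Spec_remove_data_between lines0 start end_ out) := by unfold Spec_remove_data_between; infer_instance

-- ===== CLAIM (what is proved, stated in full; the proofs are below) =====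
def Claim_equal_remove_data_between : Prop := ∀ (lines0 : List String) (start : String) (end_ : String), Dom_remove_data_between lines0 start end_ → Spec_remove_data_between lines0 start end_ (remove_data_between lines0 start end_)

-- ===== LEMMAS AND PROOFS =====

-- recursive description of B's single pass
def pvS (start end_ : String) : List String → Bool → List String
  | [], _ => []
  | l :: ls, true => pvS start end_ ls (!PySem.Str.startswith l end_)
  | l :: ls, false =>
    if PySem.Str.startswith l start then pvS start end_ ls (!PySem.Str.startswith l end_)
    else l :: pvS start end_ ls false

-- what A's inner loop leaves of the tail: everything after the first end-prefixed line
def pvE (end_ : String) : List String → List String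
  | [] => []
  | l :: ls => if PySem.Str.startswith l end_ then ls else pvE end_ ls

theorem pv_slice_eq_startswith (l p : String) :
    (PySem.Str.slice l none (some (PySem.Str.len p)) = p) ↔
      PySem.Str.startswith l p = true := by
  rw [← String.toList_inj]
  simp [PySem.Str.len_eq, PySem.List.slice_to_natCast, PySem.Chars.startswith_iff]
  rw [List.prefix_iff_eq_take]
  exact eq_comm

theorem pv_cond_iff (l p : String) :
    (PySem.Str.len p ≤ PySem.Str.len l ∧
      PySem.Str.slice l none (some (PySem.Str.len p)) = p) ↔
      PySem.Str.startswith l p = true := by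
  constructor
  · rintro ⟨_, h⟩; exact (pv_slice_eq_startswith l p).1 h
  · intro h
    refine ⟨?_, (pv_slice_eq_startswith l p).2 h⟩
    have hp : p.toList <+: l.toList := by
      rw [← PySem.Chars.startswith_iff]; simpa using h
    simp [PySem.Str.len_eq]
    exact_mod_cast hp.length_le

theorem pv_eraseIdx_append (kept : List String) (l : String) (rest : List String) :
    (kept ++ l :: rest).eraseIdx kept.length = kept ++ rest := by
  induction kept with
  | nil => rfl
  | cons k ks ih => simp [ih]

theorem pv_pop_append (kept : List String) (l : String) (rest : List String) :
    PySem.List.pop? (kept ++ l :: rest) ((kept.length : Nat) : Int) = some (l, kept ++ rest) := by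
  rw [PySem.List.pop?_natCast _ _ (by simp)]
  simp [pv_eraseIdx_append, List.getElem_append_right]

theorem pvE_length_le (end_ : String) (l : String) (ls : List String) :
    (pvE end_ (l :: ls)).length ≤ ls.length := by
  induction ls generalizing l with
  | nil => by_cases h : PySem.Str.startswith l end_ <;> simp [-PySem.Str.startswith_eq, pvE, h]
  | cons l' ls' ih =>
    by_cases h : PySem.Str.startswith l end_ <;> simp [-PySem.Str.startswith_eq, pvE, h]
    exact le_trans (ih l') (by omega)

theorem pv_fold_eq_pvS (start end_ : String) (ls : List String) (out : List String) (sk : Bool) :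
    (ls.foldl (pvBStep start end_) (out, sk)).1 = out ++ pvS start end_ ls sk := by
  induction ls generalizing out sk with
  | nil => simp [pvS]
  | cons l ls ih =>
    cases sk <;>
      by_cases h1 : PySem.Str.startswith l start <;>
      by_cases h2 : PySem.Str.startswith l end_ <;>
      simp only [List.foldl_cons, pvBStep, pvS, h1, h2, Bool.not_true, Bool.not_false,
        if_true, if_false, Bool.false_eq_true, ite_true, ite_false, ih] <;>
      simp [ih]

theorem pvS_true_eq (start end_ : String) (ls : List String) :
    pvS start end_ ls true = pvS start end_ (pvE end_ ls) false := by
  induction ls with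
  | nil => rfl
  | cons l ls ih =>
    by_cases h : PySem.Str.startswith l end_ <;>
      simp [-PySem.Str.startswith_eq, pvS, pvE, h, ih]

theorem pv_inner_eq (end_ : String) (kept : List String) (rest : List String) (l : String)
    (fuel : Nat) (hf : rest.length < fuel) :
    pvAInner end_ (PySem.Str.len end_) kept.length fuel (kept ++ l :: rest)
        (((kept ++ l :: rest).length : Nat) : Int) l
      = (kept ++ pvE end_ (l :: rest), (((kept ++ pvE end_ (l :: rest)).length : Nat) : Int)) := by
  induction rest generalizing l fuel with
  | nil =>
    obtain ⟨f, rfl⟩ : ∃ f, fuel = f + 1 := ⟨fuel - 1, by omega⟩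
    by_cases h : PySem.Str.startswith l end_
    · rw [pvAInner, if_pos ((pv_slice_eq_startswith l end_).2 h), pv_pop_append]
      simp [pvE, h]
    · rw [pvAInner, if_neg (fun hc => h ((pv_slice_eq_startswith l end_).1 hc)), pv_pop_append]
      simp [pvE, h]
  | cons l' rest' ih =>
    obtain ⟨f, rfl⟩ : ∃ f, fuel = f + 1 := ⟨fuel - 1, by omega⟩
    by_cases h : PySem.Str.startswith l end_
    · rw [pvAInner, if_pos ((pv_slice_eq_startswith l end_).2 h), pv_pop_append]
      simp [-PySem.Str.startswith_eq, pvE, h]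
      ring
    · rw [pvAInner, if_neg (fun hc => h ((pv_slice_eq_startswith l end_).1 hc)), pv_pop_append]
      simp only []
      have hne : ((kept.length : Nat) : Int) ≠ ((kept ++ l :: l' :: rest').length : Int) - 1 := by
        simp; omega
      rw [if_neg hne]
      rw [PySem.List.pyGet?_append_length kept rest' l']
      dsimp only
      have harith : ((kept ++ l :: l' :: rest').length : Int) - 1
          = (((kept ++ l' :: rest').length : Nat) : Int) := by simp; ring
      rw [harith, ih l' f (by simpa using Nat.lt_of_succ_lt_succ hf)]
      simp [-PySem.Str.startswith_eq, pvE, h]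

theorem pv_outer_eq (start end_ : String) (fuel : Nat) :
    ∀ (rest kept : List String), 2 * rest.length < fuel →
    pvAOuter start end_ (PySem.Str.len start) (PySem.Str.len end_) fuel (kept ++ rest)
        (((kept ++ rest).length : Nat) : Int) kept.length
      = kept ++ pvS start end_ rest false := by
  induction fuel with
  | zero => intro rest kept h; omega
  | succ f ih =>
    intro rest kept hf
    match rest with
    | [] => rw [pvAOuter, if_pos (by simp)]; simp [pvS]
    | l :: rest =>
      rw [pvAOuter, if_neg (by simp)]
      rw [PySem.List.pyGet?_append_length kept rest l]
      dsimp only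
      by_cases hs : PySem.Str.startswith l start
      · rw [if_pos ((pv_cond_iff l start).2 hs)]
        rw [pv_inner_eq end_ kept rest l _ (by simp; omega)]
        dsimp only
        rw [ih (pvE end_ (l :: rest)) kept (by have := pvE_length_le end_ l rest; simp at hf ⊢; omega)]
        have : pvS start end_ (l :: rest) false = pvS start end_ (pvE end_ (l :: rest)) false := by
          rw [pvS, if_pos hs]
          by_cases he : PySem.Str.startswith l end_
          · simp [-PySem.Str.startswith_eq, pvE, he]
          · have he' : PySem.Str.startswith l end_ = false := by simpa using he
            simp only [he', Bool.not_false]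
            rw [pvS_true_eq]
            simp [-PySem.Str.startswith_eq, pvE, he']
        rw [this]
      · rw [if_neg (fun hc => hs ((pv_cond_iff l start).1 hc))]
        match rest with
        | [] =>
          rw [if_pos (by simp)]
          simp [-PySem.Str.startswith_eq, pvS, hs]
        | l' :: rest' =>
          rw [if_neg (by simp)]
          have h1 : kept ++ l :: l' :: rest' = (kept ++ [l]) ++ (l' :: rest') := by simp
          have h2 : kept.length + 1 = (kept ++ [l]).length := by simp
          rw [h1, h2, ih (l' :: rest') (kept ++ [l]) (by simp at hf ⊢; omega)]
          simp [-PySem.Str.startswith_eq, pvS, hs]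

-- ===== VERDICT (by name: the statement is the Claim_ definition above) =====
theorem remove_data_between_spec : Claim_equal_remove_data_between := by
  intro lines0 start end_ _
  unfold Spec_remove_data_between remove_data_between remove_data_between_alt
  have h := pv_outer_eq start end_ (2 * lines0.length + 1) lines0 [] (by omega)
  simp only [List.nil_append, List.length_nil] at h
  rw [h, pv_fold_eq_pvS]
  simp
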